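-- pv_equiv track=rewrite | github.com/Illinois-Linguistic-Data-Management/Clitic-Analysis | CliticAnalyzer.py | has_two_verbs_with_gap
-- ===== SOURCE A (Python) =====
-- def has_two_verbs_with_gap(tokens):
--     """
--     Checks if there are two verbs in the given list of tokens.
--     The verbs can be next to each other or have specific allowed words between them.
--     """
--     allowed_gaps = {
--         1: {"a", "que", "dando"},
--         2: {"a a", "de que"}
--     }
--
--     verb_positions = [i for i, token in enumerate(tokens) if token.split('.')[-1] == 'VERB']
--     for i in range(len(verb_positions) - 1):
--         gap_size = verb_positions[i + 1] - verb_positions[i] - 1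
--         if gap_size in allowed_gaps:
--             gap_words = " ".join([tokens[j].split('.')[0] for j in range(verb_positions[i] + 1, verb_positions[i + 1])])
--             if gap_words in allowed_gaps[gap_size]:
--                 return True
--     return False
-- ===== SOURCE B (Python) =====
-- def has_two_verbs_with_gap(tokens):
--     """Fixed-window pattern match: two verbs are consecutive in the verb
--     sequence with gap 1 or 2 exactly when a window tokens[i..i+2] or
--     tokens[i..i+3] is VERB, non-verb gap, VERB with the gap words allowed;
--     so scan each index once against the two windows, with no position list,
--     no gap dict and no slice/join."""
--     parts = [t.split('.') for t in tokens]
--     is_verb = [p[-1] == 'VERB' for p in parts]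
--     word = [p[0] for p in parts]
--     n = len(tokens)
--     for i in range(n):
--         if is_verb[i]:
--             if (i + 2 < n and is_verb[i + 2] and not is_verb[i + 1]
--                     and word[i + 1] in ("a", "que", "dando")):
--                 return True
--             if (i + 3 < n and is_verb[i + 3] and not is_verb[i + 1]
--                     and not is_verb[i + 2]
--                     and word[i + 1] + " " + word[i + 2] in ("a a", "de que")):
--                 return True
--     return False
-- ===== Notes on version B (the rewrite author's own statement) =====
-- stated objective: alternative
-- what changed: Replaced A's verb-position list + consecutive-pair loop with its gap-size dict, slice and join by a single fixed-window scan that tests tokens[i..i+2] and tokens[i..i+3] directly for the VERB / allowed-gap / VERB shapes (correct because consecutive verbs at gap 1 or 2 are exactly a window with no verb tag in between).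
import Mathlib
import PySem

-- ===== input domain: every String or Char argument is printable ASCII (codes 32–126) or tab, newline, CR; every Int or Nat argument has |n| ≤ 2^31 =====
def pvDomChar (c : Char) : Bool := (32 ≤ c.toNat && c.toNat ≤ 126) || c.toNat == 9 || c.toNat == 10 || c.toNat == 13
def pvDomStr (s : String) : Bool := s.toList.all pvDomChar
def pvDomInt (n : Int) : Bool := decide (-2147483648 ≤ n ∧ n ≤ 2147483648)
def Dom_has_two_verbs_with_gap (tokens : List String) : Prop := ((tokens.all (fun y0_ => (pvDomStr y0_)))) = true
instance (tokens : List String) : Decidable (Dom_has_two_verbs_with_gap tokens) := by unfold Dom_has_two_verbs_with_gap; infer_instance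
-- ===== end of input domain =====

-- B replaces A's verb-position list + consecutive-pair loop (gap dict, slice, join)
-- by a fixed-window pattern match: a single scan testing tokens[i..i+2] and
-- tokens[i..i+3] for the VERB/gap/VERB shapes directly (alternative decomposition).

-- ===== PORT A =====
-- token.split('.')[-1]  (split('.') is never empty, so [-1] is the last element)
def pvTagA (t : String) : String := ((PySem.Str.split? t ".").getD [""]).getLastD ""
-- token.split('.')[0]
def pvWordA (t : String) : String := ((PySem.Str.split? t ".").getD [""]).headD ""

-- the body of A's pair loop for one pair (p, q) of consecutive verb positions
def pvCheckA (tokens : List String) (p q : Int) : Bool :=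
  let gap := q - p - 1
  if gap == 1 || gap == 2 then
    let gapWords := PySem.Str.join " "
      ((PySem.List.pyRange (p + 1) q 1).map (fun j => pvWordA (PySem.List.pyGetD tokens j "")))
    if gap == 1 then ["a", "que", "dando"].contains gapWords
    else ["a a", "de que"].contains gapWords
  else false

-- for i in range(len(verb_positions)-1): … (early return ≙ short-circuit ||)
def pvPairsA (tokens : List String) : List Int → Bool
  | p :: q :: rest => pvCheckA tokens p q || pvPairsA tokens (q :: rest)
  | _ => false

def has_two_verbs_with_gap (tokens : List String) : Bool :=
  let verb_positions :=
    ((PySem.List.enumerate tokens 0).filter (fun it => pvTagA it.2 == "VERB")).map (·.1)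
  pvPairsA tokens verb_positions

-- ===== PORT B =====
def has_two_verbs_with_gap_alt (tokens : List String) : Bool :=
  let parts := tokens.map (fun t => (PySem.Str.split? t ".").getD [""])
  let is_verb := parts.map (fun p => p.getLastD "" == "VERB")
  let word := parts.map (fun p => p.headD "")
  let n := tokens.length
  (List.range n).any (fun i =>
    is_verb.getD i false &&
    ((decide (i + 2 < n) && is_verb.getD (i + 2) false && !(is_verb.getD (i + 1) false) &&
        ["a", "que", "dando"].contains (word.getD (i + 1) "")) ||
     (decide (i + 3 < n) && is_verb.getD (i + 3) false && !(is_verb.getD (i + 1) false) &&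
        !(is_verb.getD (i + 2) false) &&
        ["a a", "de que"].contains (word.getD (i + 1) "" ++ " " ++ word.getD (i + 2) ""))))

-- ===== PRECONDITION & SPEC =====
def Spec_has_two_verbs_with_gap (tokens : List String) (out : Bool) : Prop := out = has_two_verbs_with_gap_alt tokens
instance (tokens : List String) (out : Bool) : Decidable (Spec_has_two_verbs_with_gap tokens out) := by unfold Spec_has_two_verbs_with_gap; infer_instance

-- ===== CLAIM (what is proved, stated in full; the proofs are below) =====
def Claim_equal_has_two_verbs_with_gap : Prop := ∀ (tokens : List String), Dom_has_two_verbs_with_gap tokens → Spec_has_two_verbs_with_gap tokens (has_two_verbs_with_gap tokens)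

-- ===== LEMMAS AND PROOFS =====

-- proof-side vocabulary: verb test and word of the token at a Nat index
def pvVerbAt (tokens : List String) (i : Nat) : Bool := pvTagA (tokens.getD i "") == "VERB"
def pvWordAt (tokens : List String) (i : Nat) : String := pvWordA (tokens.getD i "")

-- the window predicate B's loop body computes at index i
def pvWP (tokens : List String) (i : Nat) : Bool :=
  pvVerbAt tokens i &&
  ((decide (i + 2 < tokens.length) && pvVerbAt tokens (i + 2) && !(pvVerbAt tokens (i + 1)) &&
      ["a", "que", "dando"].contains (pvWordAt tokens (i + 1))) ||
   (decide (i + 3 < tokens.length) && pvVerbAt tokens (i + 3) && !(pvVerbAt tokens (i + 1)) &&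
      !(pvVerbAt tokens (i + 2)) &&
      ["a a", "de que"].contains (pvWordAt tokens (i + 1) ++ " " ++ pvWordAt tokens (i + 2))))

-- A's verb-position list, at Nat level
def pvVP (tokens : List String) : List Nat :=
  (List.range tokens.length).filter (fun k => pvVerbAt tokens k)

lemma pvAltEqAny (tokens : List String) :
    has_two_verbs_with_gap_alt tokens = (List.range tokens.length).any (pvWP tokens) := by
  unfold has_two_verbs_with_gap_alt
  simp only [List.map_map]
  refine List.any_congr rfl ?_
  intro i
  unfold pvWP pvVerbAt pvWordAt pvTagA pvWordA
  by_cases hi : i < tokens.length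
  · have e0 : tokens[i]? = some (tokens[i]'hi) := List.getElem?_eq_getElem hi
    by_cases h2 : i + 2 < tokens.length
    · have e1 : tokens[i + 1]? = some (tokens[i + 1]'(by omega)) :=
        List.getElem?_eq_getElem (by omega)
      have e2 : tokens[i + 2]? = some (tokens[i + 2]'h2) := List.getElem?_eq_getElem h2
      by_cases h3 : i + 3 < tokens.length
      · have e3 : tokens[i + 3]? = some (tokens[i + 3]'h3) := List.getElem?_eq_getElem h3
        simp [List.getD_eq_getElem?_getD, List.getElem?_map, e0, e1, h2, h3,
          Function.comp]
      · simp [List.getD_eq_getElem?_getD, List.getElem?_map, e0, e1, h2, h3,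
          Function.comp]
    · have h3 : ¬ (i + 3 < tokens.length) := by omega
      simp [List.getD_eq_getElem?_getD, List.getElem?_map, e0, h2, h3]
  · have h2 : ¬ (i + 2 < tokens.length) := by omega
    have h3 : ¬ (i + 3 < tokens.length) := by omega
    have e0 : tokens[i]? = none := List.getElem?_eq_none (by omega)
    simp [List.getD_eq_getElem?_getD, List.getElem?_map, e0, h2, h3]

lemma pvAEqPairs (tokens : List String) :
    has_two_verbs_with_gap tokens
      = pvPairsA tokens (List.map (fun k : Nat => (k : Int)) (pvVP tokens)) := by
  unfold has_two_verbs_with_gap pvVP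
  have e1 : PySem.List.enumerate tokens 0
      = List.map (fun k : Nat => ((k : Int), PySem.List.pyGetD tokens (k : Int) ""))
          (List.range tokens.length) := by
    rw [PySem.List.enumerate_eq_map_pyRange tokens "", PySem.List.len_eq,
      PySem.List.pyRange_zero_nat, List.map_map]
    rfl
  rw [e1, List.filter_map, List.map_map]
  have e2 : ((fun it : Int × String => pvTagA it.2 == "VERB") ∘
      (fun k : Nat => ((k : Int), PySem.List.pyGetD tokens (k : Int) "")))
      = fun k : Nat => pvVerbAt tokens k := by
    funext k
    simp only [Function.comp, pvVerbAt]
    rw [PySem.List.pyGetD_natCast]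
  rw [e2]
  rfl

-- pvPairsA over a cast Nat list holds iff some adjacent pair passes pvCheckA
lemma pvPairsIff (tokens : List String) (l : List Nat) :
    pvPairsA tokens (List.map (fun k : Nat => (k : Int)) l) = true
      ↔ ∃ (k : Nat) (h : k + 1 < l.length),
          pvCheckA tokens (l[k] : Int) (l[k + 1] : Int) = true := by
  induction l with
  | nil => simp [pvPairsA]
  | cons p rest ih =>
    cases rest with
    | nil => simp [pvPairsA]
    | cons q rest' =>
      simp only [List.map_cons] at ih
      simp only [List.map_cons, pvPairsA, Bool.or_eq_true, ih]
      constructor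
      · rintro (h | ⟨k, hk, hck⟩)
        · exact ⟨0, by simp, by simpa using h⟩
        · exact ⟨k + 1, by simpa using Nat.succ_lt_succ hk, by simpa using hck⟩
      · rintro ⟨k, hk, hck⟩
        cases k with
        | zero => exact Or.inl (by simpa using hck)
        | succ k' => exact Or.inr ⟨k', by simpa using Nat.lt_of_succ_lt_succ hk, by simpa using hck⟩

lemma pvVPPairwise (tokens : List String) : (pvVP tokens).Pairwise (· < ·) :=
  (List.pairwise_lt_range).filter _

lemma pvVPMem (tokens : List String) (m : Nat) :
    m ∈ pvVP tokens ↔ m < tokens.length ∧ pvVerbAt tokens m = true := by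
  simp [pvVP, List.mem_filter, List.mem_range]

-- characterisation of A's pair check at Nat positions
lemma pvCheckIff (tokens : List String) (p q : Nat) :
    pvCheckA tokens (p : Int) (q : Int) = true
      ↔ ((q = p + 2 ∧ ["a", "que", "dando"].contains (pvWordAt tokens (p + 1)) = true) ∨
         (q = p + 3 ∧ ["a a", "de que"].contains
            (pvWordAt tokens (p + 1) ++ " " ++ pvWordAt tokens (p + 2)) = true)) := by
  unfold pvCheckA
  by_cases h2 : q = p + 2
  · subst h2
    have hgap : ((p : Int) + 2) - (p : Int) - 1 = 1 := by ring
    have hr : PySem.List.pyRange ((p : Int) + 1) ((p : Int) + 2) 1 = [(p : Int) + 1] := by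
      have := PySem.List.pyRange_one_singleton ((p : Int) + 1)
      simpa [add_assoc] using this
    have hj : PySem.Str.join " " [pvWordA (PySem.List.pyGetD tokens ((p : Int) + 1) "")]
        = pvWordA (PySem.List.pyGetD tokens ((p : Int) + 1) "") := by
      apply String.toList_inj.mp
      simp [PySem.Str.toList_join, PySem.Chars.join, List.intercalate]
    have hcast : (p : Int) + 1 = ((p + 1 : Nat) : Int) := by push_cast; ring
    simp only [Nat.cast_add, Nat.cast_ofNat, hgap, hr, List.map_cons, List.map_nil, hj]
    rw [hcast, PySem.List.pyGetD_natCast]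
    simp [pvWordAt]
  · by_cases h3 : q = p + 3
    · subst h3
      have hgap : ((p : Int) + 3) - (p : Int) - 1 = 2 := by ring
      have hr : PySem.List.pyRange ((p : Int) + 1) ((p : Int) + 3) 1
          = [(p : Int) + 1, (p : Int) + 2] := by
        rw [PySem.List.pyRange_one_cons (by omega)]
        have := PySem.List.pyRange_one_singleton ((p : Int) + 2)
        have h' : PySem.List.pyRange ((p : Int) + 1 + 1) ((p : Int) + 3) 1 = [(p : Int) + 2] := by
          have e1 : (p : Int) + 1 + 1 = (p : Int) + 2 := by ring
          have e2 : (p : Int) + 3 = (p : Int) + 2 + 1 := by ring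
          rw [e1, e2]; exact this
        rw [h']
      have hj : ∀ w v : String, PySem.Str.join " " [w, v] = w ++ " " ++ v := by
        intro w v
        apply String.toList_inj.mp
        simp [PySem.Str.toList_join, PySem.Chars.join, List.intercalate]
      have hc1 : (p : Int) + 1 = ((p + 1 : Nat) : Int) := by push_cast; ring
      have hc2 : (p : Int) + 2 = ((p + 2 : Nat) : Int) := by push_cast; ring
      simp only [Nat.cast_add, Nat.cast_ofNat, hgap, hr, List.map_cons, List.map_nil, hj]
      rw [hc1, hc2, PySem.List.pyGetD_natCast, PySem.List.pyGetD_natCast]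
      simp [pvWordAt]
    · have hg1 : ¬ ((q : Int) - (p : Int) - 1 = 1) := by omega
      have hg2 : ¬ ((q : Int) - (p : Int) - 1 = 2) := by omega
      simp [hg1, hg2, h2, h3]

-- no verb strictly between two ADJACENT entries of the verb-position list
lemma pvNoBetween (tokens : List String) (k : Nat) (hk : k + 1 < (pvVP tokens).length) :
    ∀ m : Nat, (pvVP tokens)[k] < m → m < (pvVP tokens)[k + 1] → pvVerbAt tokens m = false := by
  intro m h1 h2
  by_contra hv
  have hv' : pvVerbAt tokens m = true := by
    cases h : pvVerbAt tokens m
    · exact absurd h hv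
    · rfl
  have hmn : m < tokens.length := by
    have : (pvVP tokens)[k + 1] ∈ pvVP tokens := List.getElem_mem _
    have := (pvVPMem tokens _).mp this
    omega
  have hmem : m ∈ pvVP tokens := (pvVPMem tokens m).mpr ⟨hmn, hv'⟩
  obtain ⟨j, hj, hjm⟩ := List.mem_iff_getElem.mp hmem
  have hpw := List.pairwise_iff_getElem.mp (pvVPPairwise tokens)
  rcases Nat.lt_or_ge j (k + 1) with hjk | hjk
  · rcases Nat.lt_or_ge j k with hjk' | hjk'
    · have := hpw j k (by omega) (by omega) hjk'
      omega
    · have : j = k := by omega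
      subst this; omega
  · rcases Nat.lt_or_ge (k + 1) j with hjk' | hjk'
    · have := hpw (k + 1) j (by omega) hj hjk'
      omega
    · have : j = k + 1 := by omega
      subst this; omega

-- two verb positions with no verb between them ARE adjacent in the list
lemma pvAdjacent (tokens : List String) (p q : Nat)
    (hp : p ∈ pvVP tokens) (hq : q ∈ pvVP tokens) (hpq : p < q)
    (hbet : ∀ m : Nat, p < m → m < q → pvVerbAt tokens m = false) :
    ∃ (k : Nat) (h : k + 1 < (pvVP tokens).length),
      (pvVP tokens)[k] = p ∧ (pvVP tokens)[k + 1] = q := by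
  obtain ⟨k, hkl, hkp⟩ := List.mem_iff_getElem.mp hp
  obtain ⟨j, hjl, hjq⟩ := List.mem_iff_getElem.mp hq
  have hpw := List.pairwise_iff_getElem.mp (pvVPPairwise tokens)
  have hkj : k < j := by
    rcases Nat.lt_or_ge k j with h | h
    · exact h
    · rcases Nat.lt_or_ge j k with h' | h'
      · have := hpw j k hjl hkl h'; omega
      · have : j = k := by omega
        subst this; omega
  have hlen : k + 1 < (pvVP tokens).length := by omega
  refine ⟨k, hlen, hkp, ?_⟩
  have hr1 : p < (pvVP tokens)[k + 1] := by
    have := hpw k (k + 1) hkl hlen (by omega); omega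
  have hr2 : (pvVP tokens)[k + 1] ≤ q := by
    rcases Nat.lt_or_ge (k + 1) j with h | h
    · have := hpw (k + 1) j hlen hjl h; omega
    · have : k + 1 = j := by omega
      subst this; omega
  rcases Nat.lt_or_ge ((pvVP tokens)[k + 1]) q with h | h
  · have hmem : (pvVP tokens)[k + 1] ∈ pvVP tokens := List.getElem_mem _
    have hv := ((pvVPMem tokens _).mp hmem).2
    have := hbet _ hr1 h
    rw [hv] at this
    exact absurd this (by simp)
  · omega

-- A is true iff some window predicate fires
lemma pvAIffWindow (tokens : List String) :
    has_two_verbs_with_gap tokens = true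
      ↔ ∃ i, i < tokens.length ∧ pvWP tokens i = true := by
  rw [pvAEqPairs, pvPairsIff]
  constructor
  · rintro ⟨k, hk, hck⟩
    set p := (pvVP tokens)[k] with hpdef
    set q := (pvVP tokens)[k + 1] with hqdef
    have hpmem : p ∈ pvVP tokens := List.getElem_mem _
    have hqmem : q ∈ pvVP tokens := List.getElem_mem _
    have hpn := (pvVPMem tokens p).mp hpmem
    have hqn := (pvVPMem tokens q).mp hqmem
    have hbet := pvNoBetween tokens k hk
    rcases (pvCheckIff tokens p q).mp hck with ⟨hq2, hw⟩ | ⟨hq3, hw⟩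
    · refine ⟨p, hpn.1, ?_⟩
      unfold pvWP
      have hb1 : pvVerbAt tokens (p + 1) = false := hbet (p + 1) (by omega) (by omega)
      simp [hpn.2, hq2 ▸ hqn.2, hq2 ▸ hqn.1, hb1]
      simpa using hw
    · refine ⟨p, hpn.1, ?_⟩
      unfold pvWP
      have hb1 : pvVerbAt tokens (p + 1) = false := hbet (p + 1) (by omega) (by omega)
      have hb2 : pvVerbAt tokens (p + 2) = false := hbet (p + 2) (by omega) (by omega)
      simp [hpn.2, hq3 ▸ hqn.2, hq3 ▸ hqn.1, hb1, hb2]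
      simpa using hw
  · rintro ⟨i, hi, hwp⟩
    unfold pvWP at hwp
    simp only [Bool.and_eq_true, Bool.or_eq_true, decide_eq_true_eq, Bool.not_eq_true'] at hwp
    obtain ⟨hvi, hcase⟩ := hwp
    rcases hcase with ⟨⟨⟨h2n, hv2⟩, hnv1⟩, hw⟩ | ⟨⟨⟨⟨h3n, hv3⟩, hnv1⟩, hnv2⟩, hw⟩
    · have hp : i ∈ pvVP tokens := (pvVPMem tokens i).mpr ⟨hi, hvi⟩
      have hq : i + 2 ∈ pvVP tokens := (pvVPMem tokens (i + 2)).mpr ⟨h2n, hv2⟩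
      obtain ⟨k, hkl, hkp, hkq⟩ := pvAdjacent tokens i (i + 2) hp hq (by omega)
        (by intro m hm1 hm2
            have : m = i + 1 := by omega
            subst this; exact hnv1)
      exact ⟨k, hkl, by rw [hkp, hkq]; exact (pvCheckIff tokens i (i + 2)).mpr (Or.inl ⟨rfl, hw⟩)⟩
    · have hp : i ∈ pvVP tokens := (pvVPMem tokens i).mpr ⟨hi, hvi⟩
      have hq : i + 3 ∈ pvVP tokens := (pvVPMem tokens (i + 3)).mpr ⟨h3n, hv3⟩
      obtain ⟨k, hkl, hkp, hkq⟩ := pvAdjacent tokens i (i + 3) hp hq (by omega)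
        (by intro m hm1 hm2
            rcases (by omega : m = i + 1 ∨ m = i + 2) with h | h <;> (subst h; assumption))
      exact ⟨k, hkl, by rw [hkp, hkq]; exact (pvCheckIff tokens i (i + 3)).mpr (Or.inr ⟨rfl, hw⟩)⟩

-- ===== VERDICT (by name: the statement is the Claim_ definition above) =====
theorem has_two_verbs_with_gap_spec : Claim_equal_has_two_verbs_with_gap := by
  intro tokens _
  unfold Spec_has_two_verbs_with_gap
  have hB : has_two_verbs_with_gap_alt tokens = true
      ↔ ∃ i, i < tokens.length ∧ pvWP tokens i = true := by
    rw [pvAltEqAny, List.any_eq_true]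
    constructor
    · rintro ⟨i, hi, h⟩; exact ⟨i, List.mem_range.mp hi, h⟩
    · rintro ⟨i, hi, h⟩; exact ⟨i, List.mem_range.mpr hi, h⟩
  have hA := pvAIffWindow tokens
  cases hA' : has_two_verbs_with_gap tokens
  · cases hB' : has_two_verbs_with_gap_alt tokens
    · rfl
    · exfalso
      have := hA.mpr (hB.mp hB')
      rw [hA'] at this; exact absurd this (by simp)
  · exact (hB.mpr (hA.mp hA')).symm
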